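-- pv_equiv track=rewrite | github.com/nabeelz06/praktikum-otomata | TugasW3.py | simulate_fsm
-- ===== SOURCE A (Python) =====
-- START_STATE   = "S"
--
-- ACCEPT_STATES = {"B"}
--
-- ALPHABET      = {"0", "1"}
--
-- TRANSITIONS = {
--     ("S", "0"): "A",  ("S", "1"): "B",
--     ("A", "0"): "C",  ("A", "1"): "B",
--     ("B", "0"): "A",  ("B", "1"): "B",
--     ("C", "0"): "C",  ("C", "1"): "C",
-- }
--
-- STATE_DESC = {
--     "S": "Initial state — belum membaca input",
--     "A": "Terakhir baca '0', menunggu '1'",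
--     "B": "Terakhir baca '1' — ACCEPT STATE",
--     "C": "Dead/Trap — ditemukan substring '00'",
-- }
--
-- def simulate_fsm(input_string):
--     """Return (accepted, steps_list, reason_string)."""
--     if not input_string:
--         return False, [], "String kosong — harus minimal 1 karakter"
--     for ch in input_string:
--         if ch not in ALPHABET:
--             return False, [], f"Karakter '{ch}' tidak valid. Hanya '0' dan '1'."
--
--     current = START_STATE
--     steps = [("—", current, STATE_DESC[current])]
--     for char in input_string:
--         current = TRANSITIONS[(current, char)]
--         steps.append((char, current, STATE_DESC[current]))
--
--     accepted = current in ACCEPT_STATES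
--     if accepted:
--         reason = "DITERIMA — Berakhir dengan '1' dan bebas dari substring '00'"
--     elif current == "C":
--         reason = "DITOLAK — String mengandung substring '00'"
--     else:
--         reason = "DITOLAK — Karakter terakhir bukan '1'"
--
--     return accepted, steps, reason
-- ===== SOURCE B (Python) =====
-- ALPHABET = {"0", "1"}
--
-- STATE_DESC = {
--     "S": "Initial state — belum membaca input",
--     "A": "Terakhir baca '0', menunggu '1'",
--     "B": "Terakhir baca '1' — ACCEPT STATE",
--     "C": "Dead/Trap — ditemukan substring '00'",
-- }
--
-- def simulate_fsm(input_string):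
--     """Return (accepted, steps_list, reason_string)."""
--     if not input_string:
--         return False, [], "String kosong — harus minimal 1 karakter"
--     for ch in input_string:
--         if ch not in ALPHABET:
--             return False, [], f"Karakter '{ch}' tidak valid. Hanya '0' dan '1'."
--
--     # Positional formulation: locate the first "00"; state C holds from its
--     # second '0' onwards, otherwise the state is determined by the char alone.
--     trap = next((i for i in range(len(input_string) - 1)
--                  if input_string[i] == "0" and input_string[i + 1] == "0"), None)
--
--     def state_at(k, c):
--         if trap is not None and k >= trap + 1:
--             return "C"
--         return "A" if c == "0" else "B"
--
--     steps = [("—", "S", STATE_DESC["S"])]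
--     for k, c in enumerate(input_string):
--         st = state_at(k, c)
--         steps.append((c, st, STATE_DESC[st]))
--
--     current = steps[-1][1]
--     accepted = current == "B"
--     if accepted:
--         reason = "DITERIMA — Berakhir dengan '1' dan bebas dari substring '00'"
--     elif current == "C":
--         reason = "DITOLAK — String mengandung substring '00'"
--     else:
--         reason = "DITOLAK — Karakter terakhir bukan '1'"
--
--     return accepted, steps, reason
-- ===== Notes on version B (the rewrite author's own statement) =====
-- stated objective: alternative
-- what changed: Replaces A's state-threading transition-table fold with a positional formulation: locate the first double-zero once, then compute each step's state (and the final state, read off the last step) directly from its index and character.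
import Mathlib
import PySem

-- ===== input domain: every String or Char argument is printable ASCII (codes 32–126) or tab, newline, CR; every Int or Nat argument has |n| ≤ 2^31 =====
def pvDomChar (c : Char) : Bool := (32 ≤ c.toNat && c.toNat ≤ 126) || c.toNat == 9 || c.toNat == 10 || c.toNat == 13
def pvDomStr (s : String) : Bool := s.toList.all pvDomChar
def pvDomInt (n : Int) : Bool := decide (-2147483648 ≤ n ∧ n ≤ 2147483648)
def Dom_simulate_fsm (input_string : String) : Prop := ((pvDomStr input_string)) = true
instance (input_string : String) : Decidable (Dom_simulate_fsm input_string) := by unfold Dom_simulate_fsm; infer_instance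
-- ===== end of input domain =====

-- B replaces A's state-threading transition loop by a positional formulation: find the
-- first "00" once, then compute every step's state independently from its index and char.
-- Objective: alternative decomposition (same O(n) cost, two independent passes instead of
-- one stateful fold).

-- ===== PORT A =====
-- STATE_DESC lookup (shared module constant)
def fsmDesc (s : String) : String :=
  if s == "S" then "Initial state — belum membaca input"
  else if s == "A" then "Terakhir baca '0', menunggu '1'"
  else if s == "B" then "Terakhir baca '1' — ACCEPT STATE"
  else if s == "C" then "Dead/Trap — ditemukan substring '00'"
  else ""

-- TRANSITIONS lookup; default "" is unreachable after the alphabet guard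
def fsmTrans (cur : String) (c : Char) : String :=
  if cur == "S" then (if c == '0' then "A" else if c == '1' then "B" else "")
  else if cur == "A" then (if c == '0' then "C" else if c == '1' then "B" else "")
  else if cur == "B" then (if c == '0' then "A" else if c == '1' then "B" else "")
  else if cur == "C" then (if c == '0' then "C" else if c == '1' then "C" else "")
  else ""

def simulate_fsm (input_string : String) : Bool × (List (String × String × String)) × String :=
  let cs := input_string.toList
  if cs.isEmpty then (false, [], "String kosong — harus minimal 1 karakter")
  else
    -- 'for ch: if ch not in ALPHABET: return …' = return at the first invalid char
    match cs.find? (fun ch => !(ch == '0' || ch == '1')) with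
    | some ch => (false, [], "Karakter '" ++ String.singleton ch ++ "' tidak valid. Hanya '0' dan '1'.")
    | none =>
      let r := cs.foldl
        (fun (acc : String × List (String × String × String)) char =>
          let nxt := fsmTrans acc.1 char
          (nxt, acc.2 ++ [(String.singleton char, nxt, fsmDesc nxt)]))
        ("S", [("—", "S", fsmDesc "S")])
      let accepted := r.1 == "B"
      let reason :=
        if accepted then "DITERIMA — Berakhir dengan '1' dan bebas dari substring '00'"
        else if r.1 == "C" then "DITOLAK — String mengandung substring '00'"
        else "DITOLAK — Karakter terakhir bukan '1'"
      (accepted, r.2, reason)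

-- ===== PORT B =====
-- trap = next((i for i in range(len(s)-1) if s[i]=='0' and s[i+1]=='0'), None)
def fsmFind00 : List Char → Option Int
  | c :: d :: t => if c == '0' && d == '0' then some 0 else (fsmFind00 (d :: t)).map (· + 1)
  | _ => none

def fsmStateAt (trap : Option Int) (k : Int) (c : Char) : String :=
  match trap with
  | some t => if k ≥ t + 1 then "C" else if c == '0' then "A" else "B"
  | none => if c == '0' then "A" else "B"

def simulate_fsm_alt (input_string : String) : Bool × (List (String × String × String)) × String :=
  let cs := input_string.toList
  if cs.isEmpty then (false, [], "String kosong — harus minimal 1 karakter")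
  else
    match cs.find? (fun ch => !(ch == '0' || ch == '1')) with
    | some ch => (false, [], "Karakter '" ++ String.singleton ch ++ "' tidak valid. Hanya '0' dan '1'.")
    | none =>
      let trap := fsmFind00 cs
      let steps := ("—", "S", fsmDesc "S") ::
        (PySem.List.enumerate cs).map (fun kc =>
          let st := fsmStateAt trap kc.1 kc.2
          (String.singleton kc.2, st, fsmDesc st))
      -- steps[-1][1]: steps is nonempty (a cons), so getLastD is exact
      let current := (steps.getLastD ("", "", "")).2.1
      let accepted := current == "B"
      let reason :=
        if accepted then "DITERIMA — Berakhir dengan '1' dan bebas dari substring '00'"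
        else if current == "C" then "DITOLAK — String mengandung substring '00'"
        else "DITOLAK — Karakter terakhir bukan '1'"
      (accepted, steps, reason)

-- ===== PRECONDITION & SPEC =====
def Spec_simulate_fsm (input_string : String) (out : Bool × (List (String × String × String)) × String) : Prop := out = simulate_fsm_alt input_string
instance (input_string : String) (out : Bool × (List (String × String × String)) × String) : Decidable (Spec_simulate_fsm input_string out) := by unfold Spec_simulate_fsm; infer_instance

-- ===== CLAIM (what is proved, stated in full; the proofs are below) =====
def Claim_equal_simulate_fsm : Prop := ∀ (input_string : String), Dom_simulate_fsm input_string → Spec_simulate_fsm input_string (simulate_fsm input_string)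

-- ===== LEMMAS AND PROOFS =====

-- all chars of l are '0' or '1' (the alphabet guard passed)
def Vld (l : List Char) : Prop := ∀ c ∈ l, c = '0' ∨ c = '1'

-- A's loop as structural recursion (final state, appended steps)
def runA (cur : String) : List Char → String × List (String × String × String)
  | [] => (cur, [])
  | c :: t =>
    let n := fsmTrans cur c
    let r := runA n t
    (r.1, (String.singleton c, n, fsmDesc n) :: r.2)

-- trap position measured as 'state C holds from index t on' (relative frame)
def stP (trap : Option Int) (k : Int) (c : Char) : String :=
  match trap with
  | some t => if k ≥ t then "C" else if c == '0' then "A" else "B"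
  | none => if c == '0' then "A" else "B"

-- first index at which state C holds, given whether the previous char was '0'
def trapP (pz : Bool) : List Char → Option Int
  | [] => none
  | c :: t => if pz && c == '0' then some 0 else (trapP (c == '0') t).map (· + 1)

lemma foldl_runA (l : List Char) : ∀ (cur : String) (acc : List (String × String × String)),
    l.foldl (fun acc char =>
      let nxt := fsmTrans acc.1 char
      (nxt, acc.2 ++ [(String.singleton char, nxt, fsmDesc nxt)])) (cur, acc)
    = ((runA cur l).1, acc ++ (runA cur l).2) := by
  induction l with
  | nil => intro cur acc; simp [runA]
  | cons c t ih =>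
    intro cur acc
    simp only [List.foldl_cons]
    rw [ih]
    simp [runA]

lemma fsmStateAt_eq_stP (tr : Option Int) (k : Int) (c : Char) :
    fsmStateAt tr k c = stP (tr.map (· + 1)) k c := by
  cases tr <;> rfl

lemma stP_shift (tr : Option Int) (k : Int) (c : Char) :
    stP (tr.map (· + 1)) (k + 1) c = stP tr k c := by
  cases tr with
  | none => rfl
  | some t =>
    by_cases h : t ≤ k
    · simp [stP, ge_iff_le, h, show t + 1 ≤ k + 1 by omega]
    · simp [stP, ge_iff_le, h, show ¬(t + 1 ≤ k + 1) by omega]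

lemma trapP_find00 : ∀ (t : List Char) (c : Char), trapP (c == '0') t = fsmFind00 (c :: t) := by
  intro t
  induction t with
  | nil => intro c; rfl
  | cons d t' ih => intro c; simp [trapP, fsmFind00, ih]

lemma find00_nonneg : ∀ (l : List Char) (t : Int), fsmFind00 l = some t → 0 ≤ t := by
  intro l
  induction l with
  | nil => intro r h; simp [fsmFind00] at h
  | cons c t ih =>
    intro r h
    cases t with
    | nil => simp [fsmFind00] at h
    | cons d t' =>
      rw [fsmFind00] at h
      split_ifs at h with h0
      · simp only [Option.some.injEq] at h; omega
      · obtain ⟨x, hx, hxr⟩ := Option.map_eq_some_iff.mp h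
        have := ih x hx
        omega

lemma map_enum_succ (tr : Option Int) : ∀ (l : List Char) (s : Int),
    (PySem.List.enumerate l (s + 1)).map (fun kc =>
      let st := stP (tr.map (· + 1)) kc.1 kc.2
      (String.singleton kc.2, st, fsmDesc st))
    = (PySem.List.enumerate l s).map (fun kc =>
      let st := stP tr kc.1 kc.2
      (String.singleton kc.2, st, fsmDesc st)) := by
  intro l
  induction l with
  | nil => intro s; rfl
  | cons c t ih =>
    intro s
    rw [PySem.List.enumerate_cons, PySem.List.enumerate_cons]
    simp only [List.map_cons]
    rw [stP_shift, ih (s + 1)]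

lemma mapC (l : List Char) : ∀ (s : Int), 0 ≤ s →
    (PySem.List.enumerate l s).map (fun kc =>
      let st := stP (some 0) kc.1 kc.2
      (String.singleton kc.2, st, fsmDesc st))
    = l.map (fun c => (String.singleton c, "C", fsmDesc "C")) := by
  induction l with
  | nil => intro s hs; rfl
  | cons c t ih =>
    intro s hs
    rw [PySem.List.enumerate_cons]
    simp only [List.map_cons]
    rw [ih (s + 1) (by omega)]
    simp [stP, ge_iff_le, hs]

lemma runC (l : List Char) (hv : Vld l) :
    runA "C" l = ("C", l.map (fun c => (String.singleton c, "C", fsmDesc "C"))) := by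
  induction l with
  | nil => rfl
  | cons c t ih =>
    have hc := hv c (by simp)
    have hn : fsmTrans "C" c = "C" := by rcases hc with h | h <;> subst h <;> decide
    simp only [runA, hn, List.map_cons]
    rw [ih (fun x hx => hv x (by simp [hx]))]

lemma runA_steps : ∀ (l : List Char) (pz : Bool), Vld l →
    (runA (if pz then "A" else "B") l).2
    = (PySem.List.enumerate l).map (fun kc =>
        let st := stP (trapP pz l) kc.1 kc.2
        (String.singleton kc.2, st, fsmDesc st)) := by
  intro l
  induction l with
  | nil => intro pz hv; cases pz <;> rfl
  | cons c t ih =>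
    intro pz hv
    have hc : c = '0' ∨ c = '1' := hv c (by simp)
    have hvt : Vld t := fun x hx => hv x (List.mem_cons_of_mem _ hx)
    by_cases hz : pz = true ∧ c = '0'
    · obtain ⟨hp, h0⟩ := hz
      subst hp; subst h0
      simp only [runA, if_pos trivial]
      have hn : fsmTrans "A" '0' = "C" := by decide
      rw [hn, runC t hvt]
      have htr : trapP true ('0' :: t) = some 0 := by simp [trapP]
      rw [htr, PySem.List.enumerate_cons, List.map_cons]
      rw [mapC t (0 + 1) (by omega)]
      simp [stP]
    · have hn : fsmTrans (if pz then "A" else "B") c = (if c == '0' then "A" else "B") := by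
        rcases hc with h | h <;> subst h <;> cases pz <;> simp_all <;> decide
      have hb : (pz && (c == '0')) = false := by
        cases pz <;> rcases hc with h | h <;> subst h <;> simp_all
      simp only [runA, hn]
      rw [ih (c == '0') hvt]
      have htr : trapP pz (c :: t) = (trapP (c == '0') t).map (· + 1) := by
        simp [trapP, hb]
      rw [htr, PySem.List.enumerate_cons, List.map_cons]
      rw [map_enum_succ (trapP (c == '0') t) t 0]
      have hnn : ∀ r, trapP (c == '0') t = some r → 0 ≤ r := by
        intro r hr
        exact find00_nonneg (c :: t) r (by rw [← trapP_find00]; exact hr)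
      have hhead : stP ((trapP (c == '0') t).map (· + 1)) 0 c = (if c == '0' then "A" else "B") := by
        cases htp : trapP (c == '0') t with
        | none => rfl
        | some r =>
          have := hnn r htp
          simp [stP, ge_iff_le, show ¬(r + 1 ≤ 0) by omega]
      rw [hhead]

lemma getLastD_proj {α β γ : Type} (s : List (α × β × γ)) (d d' : α × β × γ)
    (h : d.2.1 = d'.2.1) : (s.getLastD d).2.1 = (s.getLastD d').2.1 := by
  cases s with
  | nil => simpa using h
  | cons a s' => rw [List.getLastD_cons, List.getLastD_cons]

lemma runA_fin : ∀ (l : List Char) (cur : String),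
    (runA cur l).1 = ((runA cur l).2.getLastD ("", cur, "")).2.1 := by
  intro l
  induction l with
  | nil => intro cur; rfl
  | cons c t ih =>
    intro cur
    simp only [runA, List.getLastD_cons]
    rw [ih (fsmTrans cur c)]
    exact getLastD_proj _ _ _ rfl

theorem simulate_fsm_eq (s : String) : simulate_fsm s = simulate_fsm_alt s := by
  simp only [simulate_fsm, simulate_fsm_alt]
  cases hg : s.toList with
  | nil => rfl
  | cons c0 t =>
    simp only [List.isEmpty_cons, Bool.false_eq_true, if_false]
    cases hf : (c0 :: t).find? (fun ch => !(ch == '0' || ch == '1')) with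
    | some ch => rfl
    | none =>
      have hv : Vld (c0 :: t) := by
        intro x hx
        have h := List.find?_eq_none.mp hf x hx
        by_contra hcon
        push Not at hcon
        simp [hcon.1, hcon.2] at h
      have hvt : Vld t := fun x hx => hv x (List.mem_cons_of_mem _ hx)
      have hc0 : c0 = '0' ∨ c0 = '1' := hv c0 (by simp)
      have hS : fsmTrans "S" c0 = (if c0 == '0' then "A" else "B") := by
        rcases hc0 with h | h <;> subst h <;> decide
      have hsteps : (runA "S" (c0 :: t)).2
          = List.map (fun kc =>
              (String.singleton kc.2, fsmStateAt (fsmFind00 (c0 :: t)) kc.1 kc.2,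
                fsmDesc (fsmStateAt (fsmFind00 (c0 :: t)) kc.1 kc.2)))
            (PySem.List.enumerate (c0 :: t)) := by
        simp only [fsmStateAt_eq_stP]
        rw [PySem.List.enumerate_cons, List.map_cons]
        rw [map_enum_succ (fsmFind00 (c0 :: t)) t 0]
        have hhead : stP ((fsmFind00 (c0 :: t)).map (· + 1)) 0 c0 = fsmTrans "S" c0 := by
          rw [hS]
          cases htp : fsmFind00 (c0 :: t) with
          | none => rfl
          | some r =>
            have := find00_nonneg (c0 :: t) r htp
            simp [stP, ge_iff_le, show ¬(r + 1 ≤ 0) by omega]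
        rw [hhead]
        simp only [runA]
        rw [hS, runA_steps t (c0 == '0') hvt, trapP_find00]
      have hfin : (runA "S" (c0 :: t)).1
          = ((("—", "S", fsmDesc "S") :: (runA "S" (c0 :: t)).2).getLastD ("", "", "")).2.1 := by
        rw [List.getLastD_cons]
        simp only [runA]
        rw [List.getLastD_cons, runA_fin t (fsmTrans "S" c0)]
        exact getLastD_proj _ _ _ rfl
      simp only [foldl_runA (c0 :: t) "S" [("—", "S", fsmDesc "S")], List.singleton_append]
      rw [← hsteps, ← hfin]

-- ===== VERDICT (by name: the statement is the Claim_ definition above) =====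
theorem simulate_fsm_spec : Claim_equal_simulate_fsm := by
  intro s _
  unfold Spec_simulate_fsm
  exact simulate_fsm_eq s
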